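-- pv_equiv track=rewrite | github.com/yogeshjadhav22/HackerRank_Code | Missing_Numbers.py | missingNumbers
-- ===== SOURCE A (Python) =====
-- def missingNumbers(arr, brr):
--         st=[]
--         for i  in brr:
--                 if i not in st:
--                         st.append(i)
--         d1=sorted(arr)
--         d2=sorted(brr)
--         s1=sorted(st)
--         mg=[]
--         for i in s1:
--                 cnt1=0
--                 cnt2=0
--                 for j in range(0,len(d2)):
--                         if(j>=len(d1)):
--                                 if(i==d2[j]):
--                                         cnt2+=1
--                         else:
--                                 if(i==d1[j]):
--                                         cnt1+=1
--                                 if(i==d2[j]):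
--                                         cnt2+=1
--                 if(cnt1<cnt2):
--                         mg.append(i)
--         return(mg)
-- ===== SOURCE B (Python) =====
-- from collections import Counter
--
-- def missingNumbers(arr, brr):
--     # multiset difference: distinct values whose brr-count strictly exceeds
--     # their arr-count (Counter subtraction drops zero/negative residuals),
--     # in ascending order
--     return sorted(Counter(brr) - Counter(arr))
-- ===== Notes on version B (the rewrite author's own statement) =====
-- stated objective: faster
-- what changed: Replaced A's dedup loop plus a nested index scan that recounts both sorted lists for every candidate by one-shot frequency tables and a loop-free Counter multiset subtraction, sorted at the end.
-- intended difference: When len(arr) > len(brr), A's inner loop only runs len(brr) steps and so counts arr-occurrences only in a prefix of sorted(arr), wrongly reporting a value (e.g. A returns [2] on arr=[1,2,2], brr=[2]) whose full arr-count is not exceeded; B returns [] there, the intended 'occurs more often in brr' answer. — e.g. on missingNumbers([1, 2, 2], [2]): A returns [2], B returns []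
import Mathlib
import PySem

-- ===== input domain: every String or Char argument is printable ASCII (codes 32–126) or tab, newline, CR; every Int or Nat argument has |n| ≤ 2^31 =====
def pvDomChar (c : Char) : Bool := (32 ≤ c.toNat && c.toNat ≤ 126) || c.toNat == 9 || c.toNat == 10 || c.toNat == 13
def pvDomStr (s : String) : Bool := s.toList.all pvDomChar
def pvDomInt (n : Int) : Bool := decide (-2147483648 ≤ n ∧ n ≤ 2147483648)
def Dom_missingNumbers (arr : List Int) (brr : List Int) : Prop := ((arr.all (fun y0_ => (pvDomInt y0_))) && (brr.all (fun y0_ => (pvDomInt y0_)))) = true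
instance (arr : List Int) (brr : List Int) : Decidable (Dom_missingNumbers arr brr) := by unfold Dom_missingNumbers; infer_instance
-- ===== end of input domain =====

-- B replaces A's dedup loop and nested rescanning with loop-free Counter multiset
-- subtraction (simpler); on inputs with len(arr) > len(brr) A undercounts arr (see D_) and B is intended.


-- ===== PORT A =====
-- literal transliteration of A; the list indices d1[j], d2[j] are only read under the
-- guards that put them in range, so List.getD is exact there
def missingNumbers (arr : List Int) (brr : List Int) : List Int :=
  let st := brr.foldl (fun st i => if i ∈ st then st else st ++ [i]) []
  let d1 := PySem.List.sorted arr (fun x => x) false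
  let d2 := PySem.List.sorted brr (fun x => x) false
  let s1 := PySem.List.sorted st (fun x => x) false
  s1.foldl (fun mg i =>
    let c := (List.range d2.length).foldl (fun (c : Int × Int) j =>
        if d1.length ≤ j then
          (c.1, if i == d2.getD j 0 then c.2 + 1 else c.2)
        else
          ((if i == d1.getD j 0 then c.1 + 1 else c.1),
           (if i == d2.getD j 0 then c.2 + 1 else c.2)))
      (0, 0)
    if c.1 < c.2 then mg ++ [i] else mg) []

-- ===== PORT B =====
-- Counter(brr) - Counter(arr) keeps the keys with a positive residual; sorted(…) lists them ascending
def missingNumbers_alt (arr : List Int) (brr : List Int) : List Int :=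
  let ca := PySem.Dict.counter arr
  let diff := (PySem.Dict.counter brr).items.filterMap
      (fun kv => if 0 < kv.2 - ca.getD kv.1 0 then some kv.1 else none)
  PySem.List.sorted diff (fun x => x) false

-- ===== PRECONDITION & SPEC =====
-- When len(arr) > len(brr), A's inner loop runs only len(brr) steps and so counts arr-occurrences
-- only in a prefix of sorted(arr), wrongly reporting values whose full arr-count is not exceeded
-- (A returns [2] on arr=[1,2,2], brr=[2]); B returns the intended strict-majority answer ([] there).
def D_missingNumbers (arr : List Int) (brr : List Int) : Prop :=
  ∃ i ∈ brr, ((PySem.List.sorted arr (fun x => x) false).take brr.length).count i < brr.count i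
    ∧ brr.count i ≤ arr.count i
instance (arr : List Int) (brr : List Int) : Decidable (D_missingNumbers arr brr) := by
  unfold D_missingNumbers; infer_instance

def Spec_missingNumbers (arr : List Int) (brr : List Int) (out : List Int) : Prop :=
  ¬ D_missingNumbers arr brr → out = missingNumbers_alt arr brr
instance (arr : List Int) (brr : List Int) (out : List Int) : Decidable (Spec_missingNumbers arr brr out) := by unfold Spec_missingNumbers; infer_instance

def pvDiffWitness_missingNumbers : List Int × List Int := ([1, 2, 2], [2])
def pvDiffWitnessOut_missingNumbers : (List Int) × (List Int) := ([2], [])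

-- ===== CLAIM (what is proved, stated in full; the proofs are below) =====
def Claim_unchanged_missingNumbers : Prop := ∀ (arr : List Int) (brr : List Int), Dom_missingNumbers arr brr → Spec_missingNumbers arr brr (missingNumbers arr brr)
def Claim_changed_missingNumbers : Prop := Dom_missingNumbers (pvDiffWitness_missingNumbers.1) (pvDiffWitness_missingNumbers.2) ∧ D_missingNumbers (pvDiffWitness_missingNumbers.1) (pvDiffWitness_missingNumbers.2) ∧ missingNumbers (pvDiffWitness_missingNumbers.1) (pvDiffWitness_missingNumbers.2) = pvDiffWitnessOut_missingNumbers.1 ∧ missingNumbers_alt (pvDiffWitness_missingNumbers.1) (pvDiffWitness_missingNumbers.2) = pvDiffWitnessOut_missingNumbers.2 ∧ pvDiffWitnessOut_missingNumbers.1 ≠ pvDiffWitnessOut_missingNumbers.2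
def Claim_exact_missingNumbers : Prop := ∀ (arr : List Int) (brr : List Int), Dom_missingNumbers arr brr → D_missingNumbers arr brr → missingNumbers arr brr ≠ missingNumbers_alt arr brr

-- ===== LEMMAS AND PROOFS =====

-- A's inner counting loop: after n steps cnt1 counts i among the first n slots of d1, cnt2 among those of d2
theorem innerLoop_eq (d1 d2 : List Int) (i : Int) (n : Nat) (hn : n ≤ d2.length) :
    (List.range n).foldl (fun (c : Int × Int) j =>
        if d1.length ≤ j then
          (c.1, if i == d2.getD j 0 then c.2 + 1 else c.2)
        else
          ((if i == d1.getD j 0 then c.1 + 1 else c.1),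
           (if i == d2.getD j 0 then c.2 + 1 else c.2)))
      (0, 0)
    = (((d1.take n).count i : Int), ((d2.take n).count i : Int)) := by
  induction n with
  | zero => simp
  | succ n ih =>
    have h2 : n < d2.length := by omega
    rw [List.range_succ, List.foldl_append, ih (by omega)]
    simp only [List.foldl_cons, List.foldl_nil]
    rcases Nat.lt_or_ge n d1.length with h1 | h1
    · rw [if_neg (by omega)]
      rw [List.take_add_one, List.take_add_one, List.getElem?_eq_getElem h1, List.getElem?_eq_getElem h2]
      simp only [List.getD_eq_getElem?_getD, List.getElem?_eq_getElem, h1, h2,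
        List.count_append, Option.toList_some, List.count_singleton, Option.getD_some,
        beq_iff_eq, Prod.mk.injEq]
      constructor <;> split_ifs with h h' <;> push_cast <;> omega
    · rw [if_pos h1]
      rw [List.take_add_one, List.take_add_one, List.getElem?_eq_getElem h2,
        List.getElem?_eq_none_iff.mpr h1]
      simp only [List.getD_eq_getElem?_getD, List.getElem?_eq_getElem, h2,
        List.count_append, Option.toList_some, Option.toList_none, List.count_singleton,
        Option.getD_some, beq_iff_eq, Prod.mk.injEq]
      refine ⟨by simp, ?_⟩
      split_ifs with h <;> push_cast <;> omega

-- A's first loop is set(…) insertion: st = the distinct elements of brr in first-occurrence order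
theorem stfold_eq (brr : List Int) :
    brr.foldl (fun st i => if i ∈ st then st else st ++ [i]) [] = PySem.Set.ofList brr := by
  rw [PySem.Set.ofList_eq_foldl]
  apply PySem.List.foldl_congr_mem
  intro acc x _
  rw [PySem.Set.add_eq_ite]

-- A = (sorted distinct brr values) filtered by the truncated-count test
theorem portA_eq (arr brr : List Int) :
    missingNumbers arr brr =
      (PySem.List.sorted (PySem.Set.ofList brr) (fun x => x) false).filter
        (fun i => ((PySem.List.sorted arr (fun x => x) false).take brr.length).count i < brr.count i) := by
  unfold missingNumbers
  simp only [stfold_eq]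
  rw [PySem.List.foldl_congr_mem
    (g := fun (mg : List Int) (i : Int) =>
      if ((PySem.List.sorted arr (fun x => x) false).take brr.length).count i < brr.count i
      then mg ++ [i] else mg)]
  · rw [PySem.List.foldl_append_ite_eq_filter]
    simp
  · intro acc i _
    rw [innerLoop_eq _ _ _ _ (le_refl _)]
    simp only [PySem.List.length_sorted]
    rw [show List.take brr.length (PySem.List.sorted brr (fun x => x) false)
          = PySem.List.sorted brr (fun x => x) false from
        List.take_of_length_le (by rw [PySem.List.length_sorted]),
      (PySem.List.sorted_perm brr (fun x => x) false).count_eq i]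
    simp [Nat.cast_lt]

theorem filterMap_if_eq_filter (l : List Int) (p : Int → Prop) [DecidablePred p] :
    l.filterMap (fun k => if p k then some k else none) = l.filter (fun k => p k) := by
  induction l with
  | nil => rfl
  | cons x xs ih => simp only [List.filterMap_cons, List.filter_cons]; split_ifs <;> simp_all

-- sorting commutes with filtering the (duplicate-free) set of brr's values
theorem sorted_filter_comm (brr : List Int) (p : Int → Bool) :
    PySem.List.sorted ((PySem.Set.ofList brr).filter p) (fun x => x) false
      = (PySem.List.sorted (PySem.Set.ofList brr) (fun x => x) false).filter p :=
  PySem.List.sorted_eq_of_perm_of_pairwise_lt _ _ _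
    ((PySem.List.sorted_perm _ _ _).filter p)
    ((PySem.List.sorted_ofList_pairwise_lt brr).filter p)

-- B = (sorted distinct brr values) filtered by the full-count test
theorem portB_eq (arr brr : List Int) :
    missingNumbers_alt arr brr =
      (PySem.List.sorted (PySem.Set.ofList brr) (fun x => x) false).filter
        (fun i => arr.count i < brr.count i) := by
  unfold missingNumbers_alt
  simp only [PySem.Dict.items_counter, List.filterMap_map, Function.comp_def,
    PySem.Dict.getD_counter]
  rw [show (fun k => if 0 < ((brr.count k : Int)) - (arr.count k : Int) then some k else none)
        = (fun k => if arr.count k < brr.count k then some k else none) from by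
      funext k; split_ifs with h h' <;> first | rfl | omega]
  rw [filterMap_if_eq_filter, sorted_filter_comm]

theorem countTake_le (arr : List Int) (n : Nat) (i : Int) :
    ((PySem.List.sorted arr (fun x => x) false).take n).count i ≤ arr.count i :=
  le_of_le_of_eq ((List.take_sublist _ _).count_le i)
    ((PySem.List.sorted_perm arr (fun x => x) false).count_eq i)

-- ===== VERDICT (by name: the statement is the Claim_ definition above) =====
theorem missingNumbers_spec : Claim_unchanged_missingNumbers := by
  unfold Claim_unchanged_missingNumbers
  intro arr brr _ hnD
  rw [portA_eq, portB_eq]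
  apply List.filter_congr
  intro i hi
  have hib : i ∈ brr :=
    (PySem.Set.mem_ofList _ _).mp ((PySem.List.mem_sorted _ _ _ _).mp hi)
  have hle := countTake_le arr brr.length i
  have hD : ¬(((PySem.List.sorted arr (fun x => x) false).take brr.length).count i < brr.count i
      ∧ brr.count i ≤ arr.count i) := fun h => hnD ⟨i, hib, h⟩
  simp only [decide_eq_decide]
  omega

theorem missingNumbers_changed : Claim_changed_missingNumbers := by
  unfold Claim_changed_missingNumbers; decide

theorem missingNumbers_tight : Claim_exact_missingNumbers := by
  unfold Claim_exact_missingNumbers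
  intro arr brr _ hD heq
  obtain ⟨i, hib, h1, h2⟩ := hD
  have hiS : i ∈ PySem.List.sorted (PySem.Set.ofList brr) (fun x => x) false :=
    (PySem.List.mem_sorted _ _ _ _).mpr ((PySem.Set.mem_ofList _ _).mpr hib)
  have hA : i ∈ missingNumbers arr brr := by
    rw [portA_eq]; exact List.mem_filter.mpr ⟨hiS, by simpa using h1⟩
  have hB : i ∉ missingNumbers_alt arr brr := by
    rw [portB_eq]
    intro h
    have := (List.mem_filter.mp h).2
    simp only [decide_eq_true_eq] at this
    omega
  rw [heq] at hA
  exact hB hA
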